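-- pv_equiv track=rewrite | github.com/bjoernpl/handball_referee_eval | merge.py | merge_data
-- ===== SOURCE A (Python) =====
-- def merge_data(questions, answers):
--     merged = {}
--     for question in questions:
--         question_number = question["question_number"]
--         merged[question_number] = question
--
--     for answer in answers:
--         question_number = answer["question_number"]
--         if question_number in merged:
--             merged[question_number].update(answer)
--
--     return list(merged.values())
-- ===== SOURCE B (Python) =====
-- def merge_data(questions, answers):
--     # Same return value as A (and, like A, mutates the surviving question dicts
--     # in place): group the answers by question_number once, then do one pass
--     # over the merged questions applying each group.
--     by_number = {}
--     for answer in answers: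
--         by_number.setdefault(answer["question_number"], []).append(answer)
--     merged = {}
--     for question in questions:
--         merged[question["question_number"]] = question
--     result = []
--     for number, question in merged.items():
--         for answer in by_number.get(number, []):
--             question.update(answer)
--         result.append(question)
--     return result
-- ===== Notes on version B (the rewrite author's own statement) =====
-- stated objective: alternative
-- what changed: B pre-groups the answers into a question_number -> [answers] index in one pass, then produces the output in a single final pass over the merged questions applying each group, instead of A's conditional in-place update scan over the raw answers list; both remain O(n+m).
import Mathlib
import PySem

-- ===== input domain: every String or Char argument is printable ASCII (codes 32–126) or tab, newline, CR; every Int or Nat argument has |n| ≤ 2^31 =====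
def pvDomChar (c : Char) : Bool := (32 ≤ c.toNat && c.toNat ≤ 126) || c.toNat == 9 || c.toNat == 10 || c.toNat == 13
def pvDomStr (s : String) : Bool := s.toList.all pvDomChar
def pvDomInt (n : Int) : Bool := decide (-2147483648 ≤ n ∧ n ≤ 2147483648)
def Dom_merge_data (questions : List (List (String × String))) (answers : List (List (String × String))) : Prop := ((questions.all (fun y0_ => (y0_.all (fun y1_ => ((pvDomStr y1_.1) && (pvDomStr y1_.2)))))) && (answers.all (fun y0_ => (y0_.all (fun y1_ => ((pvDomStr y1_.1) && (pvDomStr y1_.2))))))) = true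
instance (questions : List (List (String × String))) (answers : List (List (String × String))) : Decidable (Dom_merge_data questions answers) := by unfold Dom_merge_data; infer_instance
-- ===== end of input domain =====

-- B pre-groups the answers by question_number and then builds the result in one
-- final pass over the merged questions; same return value as A on Pre_.
-- (Both Pythons mutate the surviving question dicts in place; the equivalence
-- proved here is about the return value.)

-- d["question_number"]; exact under Pre_ (the key is present; Python raises KeyError otherwise)
def pvQKey (d : List (String × String)) : String := (PySem.Dict.mk d).getD "question_number" ""

-- q.update(a) for the inner dicts (Python dict.update)
def pvUpdate (q a : List (String × String)) : List (String × String) := ((PySem.Dict.mk q).update a).items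

-- ===== PORT A =====
def merge_data (questions : List (List (String × String))) (answers : List (List (String × String))) : List (List (String × String)) :=
  let merged : PySem.Dict String (List (String × String)) :=
    questions.foldl (fun m q => m.insert (pvQKey q) q) PySem.Dict.empty
  let merged2 :=
    answers.foldl
      (fun m a =>
        if m.contains (pvQKey a) then m.modify (pvQKey a) [] (fun q => pvUpdate q a) else m)
      merged
  merged2.values

-- ===== PORT B =====
-- by_number.setdefault(qn, []).append(a), i.e. by_number[qn] = by_number.get(qn, []) + [a]
def pvGroup (answers : List (List (String × String))) : PySem.Dict String (List (List (String × String))) :=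
  answers.foldl (fun d a => d.modify (pvQKey a) [] (fun l => l ++ [a])) PySem.Dict.empty

def merge_data_alt (questions : List (List (String × String))) (answers : List (List (String × String))) : List (List (String × String)) :=
  let byNumber := pvGroup answers
  let merged : PySem.Dict String (List (String × String)) :=
    questions.foldl (fun m q => m.insert (pvQKey q) q) PySem.Dict.empty
  merged.items.map (fun p => (byNumber.getD p.1 []).foldl (fun q a => pvUpdate q a) p.2)

-- ===== PRECONDITION & SPEC =====
-- Pre_ requires each question/answer assoc list to carry the key "question_number"
-- (Python raises KeyError otherwise) and to have no duplicate keys: a Python dict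
-- cannot hold duplicate keys, so such lists represent no Python input.
def Pre_merge_data (questions : List (List (String × String))) (answers : List (List (String × String))) : Prop :=
  ∀ d ∈ questions ++ answers,
    (PySem.Dict.mk d).contains "question_number" = true ∧ (d.map Prod.fst).Nodup
instance (questions : List (List (String × String))) (answers : List (List (String × String))) : Decidable (Pre_merge_data questions answers) := by unfold Pre_merge_data; infer_instance
def pvWitness_merge_data : (List (List (String × String))) × (List (List (String × String))) :=
  ([[("question_number", "1"), ("text", "q?")]], [[("question_number", "1"), ("ans", "yes")]])

def Spec_merge_data (questions : List (List (String × String))) (answers : List (List (String × String))) (out : List (List (String × String))) : Prop := out = merge_data_alt questions answers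
instance (questions : List (List (String × String))) (answers : List (List (String × String))) (out : List (List (String × String))) : Decidable (Spec_merge_data questions answers out) := by unfold Spec_merge_data; infer_instance

-- ===== CLAIM (what is proved, stated in full; the proofs are below) =====
def Claim_equal_merge_data : Prop := ∀ (questions : List (List (String × String))) (answers : List (List (String × String))), Dom_merge_data questions answers → Pre_merge_data questions answers → Spec_merge_data questions answers (merge_data questions answers)

-- ===== LEMMAS AND PROOFS =====

-- grouping pass of B: the bucket of n is the n-keyed answers in order
theorem pvGroup_getD (as : List (List (String × String)))
    (d : PySem.Dict String (List (List (String × String)))) (n : String) :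
    (as.foldl (fun d a => d.modify (pvQKey a) [] (fun l => l ++ [a])) d).getD n []
      = d.getD n [] ++ as.filter (fun a => pvQKey a == n) := by
  induction as generalizing d with
  | nil => simp
  | cons a as ih =>
    rw [List.foldl_cons, ih, PySem.Dict.getD_modify]
    by_cases h : n = pvQKey a
    · simp [h]
    · have h' : (pvQKey a == n) = false := beq_eq_false_iff_ne.mpr (Ne.symm h)
      simp [h, h']

-- A's answer pass, characterised entrywise on the merged dict
theorem merge_data_afold (as : List (List (String × String)))
    (m : PySem.Dict String (List (String × String))) (hnd : m.keys.Nodup) :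
    (as.foldl
        (fun m a =>
          if m.contains (pvQKey a) then m.modify (pvQKey a) [] (fun q => pvUpdate q a) else m)
        m).items
      = m.items.map (fun p => (p.1, (as.filter (fun a => pvQKey a == p.1)).foldl (fun q a => pvUpdate q a) p.2)) := by
  induction as generalizing m with
  | nil => simp
  | cons a as ih =>
    rw [List.foldl_cons]
    by_cases hc : m.contains (pvQKey a) = true
    · have hstep : (if m.contains (pvQKey a) then m.modify (pvQKey a) [] (fun q => pvUpdate q a) else m)
          = m.insert (pvQKey a) (pvUpdate (m.getD (pvQKey a) []) a) := by
        simp [hc]; rfl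
      rw [hstep]
      have hnd' : (m.insert (pvQKey a) (pvUpdate (m.getD (pvQKey a) []) a)).keys.Nodup :=
        PySem.Dict.nodup_keys_insert _ _ _ hnd
      rw [ih _ hnd', PySem.Dict.items_insert_of_contains _ _ hc, List.map_map]
      refine List.map_congr_left ?_
      intro p hp
      by_cases hpk : p.1 = pvQKey a
      · have hmem : (p.1, p.2) ∈ m.items := by simpa using hp
        have hgd : m.getD (pvQKey a) [] = p.2 := hpk ▸ PySem.Dict.getD_of_mem_items m hmem hnd []
        simp [Function.comp, hpk, hgd]
      · have hne : (p.1 == pvQKey a) = false := by simpa using hpk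
        have hne' : (pvQKey a == p.1) = false := beq_eq_false_iff_ne.mpr (Ne.symm hpk)
        simp [Function.comp, hne, hne']
    · have hstep : (if m.contains (pvQKey a) then m.modify (pvQKey a) [] (fun q => pvUpdate q a) else m) = m := by
        simp [hc]
      rw [hstep, ih _ hnd]
      refine List.map_congr_left ?_
      intro p hp
      have hpm : p.1 ∈ m.keys := by
        have : (p.1, p.2) ∈ m.items := by simpa using hp
        exact PySem.Dict.mem_keys_of_mem_items m this
      have hpk : p.1 ≠ pvQKey a := by
        intro h
        exact hc ((PySem.Dict.contains_iff_mem_keys m (pvQKey a)).mpr (h ▸ hpm))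
      have hne' : (pvQKey a == p.1) = false := beq_eq_false_iff_ne.mpr (Ne.symm hpk)
      simp [hne']

-- ===== VERDICT (by name: the statement is the Claim_ definition above) =====
theorem merge_data_spec : Claim_equal_merge_data := by
  intro questions answers _ _
  unfold Spec_merge_data merge_data merge_data_alt
  have hnd : (questions.foldl (fun m q => m.insert (pvQKey q) q) PySem.Dict.empty).keys.Nodup :=
    PySem.Dict.nodup_keys_foldl_insert_key questions pvQKey _ _ (by simp)
  have hv : ∀ (d : PySem.Dict String (List (String × String))), d.values = d.items.map (·.2) :=
    fun _ => rfl
  rw [hv, merge_data_afold answers _ hnd, List.map_map]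
  refine List.map_congr_left ?_
  intro p _
  simp [Function.comp, pvGroup, pvGroup_getD]
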